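-- pv_equiv track=rewrite | github.com/yuanyao1/Launch_School | py110/lesson_1/consonants.py | count_cons
-- ===== SOURCE A (Python) =====
-- def count_cons(text):
--     max_adj_cons = 0
--     sub_text = ""
--     sub_text_adj_cons = 0
--
--     for char in text:
--         if char in VOWELS:
--             sub_text = ""
--             sub_text_adj_cons = 0
--             continue
--
--         sub_text += char
--         sub_text_adj_cons += 1
--
--         if sub_text_adj_cons > max_adj_cons:
--             max_adj_cons = sub_text_adj_cons
--
--     return 0 if max_adj_cons < 2 else max_adj_cons
--
-- VOWELS = ('a', 'e', 'i', 'o', 'u')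
-- ===== SOURCE B (Python) =====
-- VOWELS = ('a', 'e', 'i', 'o', 'u')
--
-- def count_cons(text):
--     best = 0
--     i = 0
--     n = len(text)
--     while i < n:
--         if text[i] in VOWELS:
--             i += 1
--         else:
--             j = i + 1
--             while j < n and text[j] not in VOWELS:
--                 j += 1
--             if j - i > best:
--                 best = j - i
--             i = j
--     return best if best >= 2 else 0
-- ===== Notes on version B (the rewrite author's own statement) =====
-- stated objective: alternative
-- what changed: Replaces the per-character running counter (and string accumulator) with a two-level scan that jumps over each maximal consonant run at once and compares whole run lengths against the best.
import Mathlib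
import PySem

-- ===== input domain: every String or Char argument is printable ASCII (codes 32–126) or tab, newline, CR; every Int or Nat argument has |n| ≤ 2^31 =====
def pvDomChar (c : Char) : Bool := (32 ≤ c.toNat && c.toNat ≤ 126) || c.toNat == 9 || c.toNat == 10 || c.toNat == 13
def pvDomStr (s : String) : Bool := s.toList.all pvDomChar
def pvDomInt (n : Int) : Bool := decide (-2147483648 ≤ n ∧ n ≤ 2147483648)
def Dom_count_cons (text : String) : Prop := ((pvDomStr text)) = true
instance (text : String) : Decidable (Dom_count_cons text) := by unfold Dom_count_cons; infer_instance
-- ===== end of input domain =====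

-- B replaces A's per-character running counter (and its string accumulator) with a
-- two-level scan that skips over each maximal consonant run at once; same O(n) cost.


def isVowel (c : Char) : Bool := c = 'a' || c = 'e' || c = 'i' || c = 'o' || c = 'u'

-- ===== PORT A =====
-- state = (max_adj_cons, sub_text, sub_text_adj_cons)
def ccStepA (st : Int × String × Int) (char : Char) : Int × String × Int :=
  if isVowel char then (st.1, "", 0)
  else if st.2.2 + 1 > st.1 then (st.2.2 + 1, st.2.1.push char, st.2.2 + 1)
  else (st.1, st.2.1.push char, st.2.2 + 1)

def count_cons (text : String) : Int :=
  let st := text.toList.foldl ccStepA (0, "", 0)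
  if st.1 < 2 then 0 else st.1

-- ===== PORT B =====
-- outer loop of Source B: skip a vowel, or measure and jump over a whole consonant run
def ccRunB : List Char → Int → Int
  | [], best => best
  | c :: rest, best =>
    if isVowel c then ccRunB rest best
    else
      let run : Int := 1 + (rest.takeWhile (fun x => !isVowel x)).length
      ccRunB (rest.dropWhile (fun x => !isVowel x)) (if run > best then run else best)
termination_by l _ => l.length
decreasing_by
  all_goals simp only [List.length_cons]
  · omega
  · exact Nat.lt_succ_of_le (List.length_dropWhile_le _ _)

def count_cons_alt (text : String) : Int :=
  let best := ccRunB text.toList 0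
  if best ≥ 2 then best else 0

-- ===== PRECONDITION & SPEC =====
def Spec_count_cons (text : String) (out : Int) : Prop := out = count_cons_alt text
instance (text : String) (out : Int) : Decidable (Spec_count_cons text out) := by unfold Spec_count_cons; infer_instance

-- ===== CLAIM (what is proved, stated in full; the proofs are below) =====
def Claim_equal_count_cons : Prop := ∀ (text : String), Dom_count_cons text → Spec_count_cons text (count_cons text)

-- ===== LEMMAS AND PROOFS =====

-- ghost function: the maximum consonant-run length of a list (0 if none)
def runMax : List Char → Int
  | [] => 0
  | c :: rest =>
    if isVowel c then runMax rest
    else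
      max (1 + (rest.takeWhile (fun x => !isVowel x)).length)
          (runMax (rest.dropWhile (fun x => !isVowel x)))
termination_by l => l.length
decreasing_by
  all_goals simp only [List.length_cons]
  · omega
  · exact Nat.lt_succ_of_le (List.length_dropWhile_le _ _)

theorem runMax_nil : runMax [] = 0 := by simp [runMax]

theorem runMax_cons (c : Char) (rest : List Char) :
    runMax (c :: rest) =
      if isVowel c then runMax rest
      else max (1 + ((rest.takeWhile (fun x => !isVowel x)).length : Int))
               (runMax (rest.dropWhile (fun x => !isVowel x))) := by
  rw [runMax.eq_def]

theorem runMax_nonneg (l : List Char) : 0 ≤ runMax l := by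
  fun_induction runMax l with
  | case1 => simp
  | case2 c rest h ih => simpa [runMax_cons, h] using ih
  | case3 c rest h ih => omega

-- the length of the leading consonant run, as an Int
def lead (l : List Char) : Int := ((l.takeWhile (fun x => !isVowel x)).length : Int)

theorem lead_nonneg (l : List Char) : 0 ≤ lead l := by simp [lead]

theorem lead_le_runMax (l : List Char) : lead l ≤ runMax l := by
  cases l with
  | nil => simp [lead, runMax_nil]
  | cons c rest =>
    rw [runMax_cons]
    by_cases h : isVowel c
    · have := runMax_nonneg rest
      simp [lead, List.takeWhile, h]
      omega
    · simp [lead, h]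

theorem runMax_drop (l : List Char) :
    runMax l = max (lead l) (runMax (l.dropWhile (fun x => !isVowel x))) := by
  cases l with
  | nil => simp [lead, runMax_nil]
  | cons c rest =>
    rw [runMax_cons]
    by_cases h : isVowel c
    · have h0 : lead (c :: rest) = 0 := by simp [lead, List.takeWhile, h]
      have h1 : (c :: rest).dropWhile (fun x => !isVowel x) = c :: rest := by
        simp [List.dropWhile, h]
      rw [h0, h1, runMax_cons]
      have := runMax_nonneg rest
      simp [h]
      omega
    · have h0 : lead (c :: rest) = 1 + lead rest := by
        simp [lead, List.takeWhile, h]; omega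
      have h1 : (c :: rest).dropWhile (fun x => !isVowel x) = rest.dropWhile (fun x => !isVowel x) := by
        simp [List.dropWhile, h]
      rw [h0, h1]
      simp [lead, h]

theorem ccRunB_eq (l : List Char) (b : Int) (hb : 0 ≤ b) :
    ccRunB l b = max b (runMax l) := by
  fun_induction ccRunB l b with
  | case1 b => rw [runMax_nil]; omega
  | case2 c rest b h ih =>
    rw [runMax_cons]; simp only [h, if_true, ih hb]
  | case3 c rest b h run ih =>
    rw [runMax_cons]
    simp only [dite_eq_ite] at ih
    have hrun : run = 1 + ((rest.takeWhile (fun x => !isVowel x)).length : Int) := rfl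
    have hb' : (0:Int) ≤ (if run > b then run else b) := by split_ifs <;> omega
    rw [ih hb', if_neg h]
    have := runMax_nonneg (rest.dropWhile (fun x => !isVowel x))
    split_ifs <;> omega

theorem foldA_eq (l : List Char) (m k : Int) (s : String) (hk : 0 ≤ k) (hkm : k ≤ m) :
    (l.foldl ccStepA (m, s, k)).1 = max m (max (k + lead l) (runMax l)) := by
  induction l generalizing m k s with
  | nil =>
    simp [lead, runMax_nil]
    omega
  | cons c rest ih =>
    rw [List.foldl_cons]
    by_cases h : isVowel c
    · have h1 : ccStepA (m, s, k) c = (m, "", 0) := by simp [ccStepA, h]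
      rw [h1, ih m 0 "" le_rfl (le_trans hk hkm)]
      have h2 : lead (c :: rest) = 0 := by simp [lead, List.takeWhile, h]
      have h3 : runMax (c :: rest) = runMax rest := by rw [runMax_cons]; simp [h]
      have h4 := lead_le_runMax rest
      rw [h2, h3]
      omega
    · have hstep : ccStepA (m, s, k) c =
          (if k + 1 > m then k + 1 else m, s.push c, k + 1) := by
        unfold ccStepA
        rw [if_neg h]
        split_ifs <;> rfl
      have hm' : k + 1 ≤ (if k + 1 > m then k + 1 else m) := by split_ifs <;> omega
      rw [hstep, ih _ (k + 1) (s.push c) (by omega) hm']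
      have h2 : lead (c :: rest) = 1 + lead rest := by
        simp [lead, List.takeWhile, h]; omega
      have h3 : runMax (c :: rest) =
          max (1 + lead rest) (runMax (rest.dropWhile (fun x => !isVowel x))) := by
        rw [runMax_cons]; simp [h, lead]
      have h4 := runMax_drop rest
      have h5 := lead_nonneg rest
      have h6 := runMax_nonneg (rest.dropWhile (fun x => !isVowel x))
      rw [h2, h3]
      split_ifs <;> omega

-- ===== VERDICT (by name: the statement is the Claim_ definition above) =====
theorem count_cons_spec : Claim_equal_count_cons := by
  intro text _
  unfold Spec_count_cons
  have hA : count_cons text =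
      (if (List.foldl ccStepA (0, "", 0) text.toList).1 < 2 then 0
       else (List.foldl ccStepA (0, "", 0) text.toList).1) := rfl
  have hB : count_cons_alt text =
      (if ccRunB text.toList 0 ≥ 2 then ccRunB text.toList 0 else 0) := rfl
  rw [hA, hB, ccRunB_eq _ _ le_rfl, foldA_eq _ 0 0 "" le_rfl le_rfl]
  have h1 := lead_le_runMax text.toList
  have h2 := runMax_nonneg text.toList
  have h3 := lead_nonneg text.toList
  split_ifs <;> omega
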